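-- pv_equiv track=rewrite | github.com/Brobin/project-euler | src/problem_006.py | dif_sum_square
-- ===== SOURCE A (Python) =====
-- def dif_sum_square(num):
-- 	sumSquares = 0
-- 	sums = 0
-- 	for y in range(1, num + 1):
-- 		sums += y
-- 		sumSquares += y ** 2
-- 	sums = sums ** 2
-- 	return sums - sumSquares
-- ===== SOURCE B (Python) =====
-- def dif_sum_square(num):
--     # Closed-form: sum 1..n = n(n+1)/2, sum of squares = n(n+1)(2n+1)/6.
--     n = max(num, 0)
--     s = n * (n + 1) // 2
--     sq = n * (n + 1) * (2 * n + 1) // 6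
--     return s * s - sq
-- ===== Notes on version B (the rewrite author's own statement) =====
-- stated objective: faster
-- what changed: Replaces the linear accumulation loop with the closed-form polynomial formulas for the sum and the sum of squares, computed in constant time.
import Mathlib
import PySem

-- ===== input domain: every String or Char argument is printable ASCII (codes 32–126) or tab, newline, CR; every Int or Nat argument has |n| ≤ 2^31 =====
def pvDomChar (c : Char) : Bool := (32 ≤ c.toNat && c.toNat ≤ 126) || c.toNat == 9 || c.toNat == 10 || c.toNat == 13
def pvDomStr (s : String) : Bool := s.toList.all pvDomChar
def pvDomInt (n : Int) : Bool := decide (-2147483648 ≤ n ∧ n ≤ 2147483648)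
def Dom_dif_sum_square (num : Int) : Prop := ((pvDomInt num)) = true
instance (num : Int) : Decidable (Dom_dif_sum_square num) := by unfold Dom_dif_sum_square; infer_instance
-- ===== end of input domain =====

-- B replaces A's O(n) accumulation loop with the closed-form sum formulas (O(1)).


-- ===== PORT A =====
def dif_sum_square (num : Int) : Int :=
  let st := (PySem.List.pyRange 1 (num + 1) 1).foldl
    (fun (p : Int × Int) y => (p.1 + y, p.2 + y ^ 2)) (0, 0)
  st.1 ^ 2 - st.2

-- ===== PORT B =====
def dif_sum_square_alt (num : Int) : Int :=
  let n := max num 0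
  let s := PySem.Int.floordiv (n * (n + 1)) 2
  let sq := PySem.Int.floordiv (n * (n + 1) * (2 * n + 1)) 6
  s * s - sq

-- ===== PRECONDITION & SPEC =====
def Spec_dif_sum_square (num : Int) (out : Int) : Prop := out = dif_sum_square_alt num
instance (num : Int) (out : Int) : Decidable (Spec_dif_sum_square num out) := by unfold Spec_dif_sum_square; infer_instance

-- ===== CLAIM (what is proved, stated in full; the proofs are below) =====
def Claim_equal_dif_sum_square : Prop := ∀ (num : Int), Dom_dif_sum_square num → Spec_dif_sum_square num (dif_sum_square num)

-- ===== LEMMAS AND PROOFS =====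

-- The loop invariant: after folding over 1..n, twice the running sum is n(n+1)
-- and six times the running sum of squares is n(n+1)(2n+1).
theorem pv_fold_closed (n : ℕ) :
    2 * (((List.range n).map (fun k : ℕ => (1 : Int) + k)).foldl
        (fun (p : Int × Int) y => (p.1 + y, p.2 + y ^ 2)) (0, 0)).1
      = (n : Int) * (n + 1) ∧
    6 * (((List.range n).map (fun k : ℕ => (1 : Int) + k)).foldl
        (fun (p : Int × Int) y => (p.1 + y, p.2 + y ^ 2)) (0, 0)).2
      = (n : Int) * (n + 1) * (2 * n + 1) := by
  induction n with
  | zero => simp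
  | succ m ih =>
    obtain ⟨h1, h2⟩ := ih
    rw [List.range_succ, List.map_append, List.foldl_append]
    simp only [List.map_cons, List.map_nil, List.foldl_cons, List.foldl_nil]
    push_cast
    constructor
    · nlinarith [h1]
    · nlinarith [h1, h2]

theorem dif_sum_square_spec : Claim_equal_dif_sum_square := by
  intro num _
  unfold Spec_dif_sum_square dif_sum_square dif_sum_square_alt
  rw [PySem.List.pyRange_one]
  have hd : (num + 1 - 1) = num := by ring
  rw [hd]
  obtain ⟨h1, h2⟩ := pv_fold_closed num.toNat
  have hmax : ((num.toNat : Int)) = max num 0 := Int.ofNat_toNat num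
  rw [hmax] at h1 h2
  set r := ((List.range num.toNat).map (fun k : ℕ => (1 : Int) + k)).foldl
      (fun (p : Int × Int) y => (p.1 + y, p.2 + y ^ 2)) (0, 0) with hr
  simp only
  have e1 : PySem.Int.floordiv (max num 0 * (max num 0 + 1)) 2 = r.1 := by
    rw [← h1, PySem.Int.floordiv, Int.mul_fdiv_cancel_left _ (by norm_num)]
  have e2 : PySem.Int.floordiv (max num 0 * (max num 0 + 1) * (2 * max num 0 + 1)) 6 = r.2 := by
    rw [← h2, PySem.Int.floordiv, Int.mul_fdiv_cancel_left _ (by norm_num)]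
  rw [e1, e2]
  ring
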